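-- pv_equiv track=rewrite | github.com/Viviviiii/jasp-multimodal-rag | src/ingestion/video_loader.py | merge_uppercase_titles
-- ===== SOURCE A (Python) =====
-- def merge_uppercase_titles(lines):
--     """Merge consecutive ALL-CAPS lines into a single title joined by ':'."""
--     merged = []
--     buffer = []
--     for line in lines:
--         if line.isupper() and len(line.split()) > 1:
--             buffer.append(line)
--         else:
--             if buffer:
--                 merged.append(": ".join(buffer))
--                 buffer = []
--             merged.append(line)
--     if buffer:
--         merged.append(": ".join(buffer))
--     return merged
-- ===== SOURCE B (Python) =====
-- def merge_uppercase_titles(lines):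
--     """Merge consecutive ALL-CAPS lines into a single title joined by ':'."""
--     def is_title(l):
--         return l.isupper() and len(l.split()) > 1
--
--     out = []
--     i = 0
--     n = len(lines)
--     while i < n:
--         if is_title(lines[i]):
--             j = i + 1
--             while j < n and is_title(lines[j]):
--                 j += 1
--             out.append(": ".join(lines[i:j]))
--             i = j
--         else:
--             out.append(lines[i])
--             i += 1
--     return out
-- ===== Notes on version B (the rewrite author's own statement) =====
-- stated objective: alternative
-- what changed: Replaces A's streaming buffer/flush accumulator with an index-based run scanner: each maximal run of title lines is located with an inner while and emitted at once via a slice join, so no pending-buffer state or trailing flush exists.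
import Mathlib
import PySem

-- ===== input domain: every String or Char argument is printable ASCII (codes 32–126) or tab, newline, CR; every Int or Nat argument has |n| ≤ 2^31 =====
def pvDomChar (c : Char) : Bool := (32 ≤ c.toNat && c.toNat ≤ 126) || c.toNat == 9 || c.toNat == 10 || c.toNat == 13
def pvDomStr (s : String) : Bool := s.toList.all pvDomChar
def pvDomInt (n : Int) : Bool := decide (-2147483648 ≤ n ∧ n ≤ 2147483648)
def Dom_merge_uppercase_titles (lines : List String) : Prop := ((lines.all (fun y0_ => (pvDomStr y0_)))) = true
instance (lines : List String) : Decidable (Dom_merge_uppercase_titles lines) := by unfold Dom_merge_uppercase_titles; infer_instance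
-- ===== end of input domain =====

-- B replaces A's buffer/flush streaming accumulator with an index-based run scan (each maximal title run located and joined at once); return values agree on all inputs.

-- str.isupper(): at least one cased character and no lowercase one; exact on the ASCII domain (cased = alphabetic there)
def pyIsupper (s : String) : Bool :=
  s.toList.any PySem.Chars.isalpha && s.toList.all (fun c => ! PySem.Chars.islower c)

-- the shared title test 'line.isupper() and len(line.split()) > 1', as both Pythons write it
def isTitle (l : String) : Bool :=
  pyIsupper l && decide ((PySem.Str.split₀ l).length > 1)

-- ===== PORT A =====
def merge_uppercase_titles (lines : List String) : List String :=
  let st := lines.foldl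
    (fun (s : List String × List String) line =>
      if isTitle line then
        (s.1, s.2 ++ [line])
      else
        let merged := if s.2 ≠ [] then s.1 ++ [PySem.Str.join ": " s.2] else s.1
        (merged ++ [line], []))
    ([], [])
  if st.2 ≠ [] then st.1 ++ [PySem.Str.join ": " st.2] else st.1

-- ===== PORT B =====
-- B's outer while with the inner run-extending while: the inner scan as takeWhile/dropWhile;
-- the fuel (initially lines.length) only makes the same computation total — it never runs out
def altGo : Nat → List String → List String
  | _, [] => []
  | 0, ls => ls         -- fuel exhausted: unreachable for fuel ≥ length
  | fuel + 1, l :: rest =>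
    if isTitle l then
      PySem.Str.join ": " (l :: rest.takeWhile isTitle) :: altGo fuel (rest.dropWhile isTitle)
    else
      l :: altGo fuel rest

def merge_uppercase_titles_alt (lines : List String) : List String :=
  altGo lines.length lines

-- ===== PRECONDITION & SPEC =====
def Spec_merge_uppercase_titles (lines : List String) (out : List String) : Prop := out = merge_uppercase_titles_alt lines
instance (lines : List String) (out : List String) : Decidable (Spec_merge_uppercase_titles lines out) := by unfold Spec_merge_uppercase_titles; infer_instance

-- ===== CLAIM (what is proved, stated in full; the proofs are below) =====
def Claim_equal_merge_uppercase_titles : Prop := ∀ (lines : List String), Dom_merge_uppercase_titles lines → Spec_merge_uppercase_titles lines (merge_uppercase_titles lines)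

-- ===== LEMMAS AND PROOFS =====

-- A's loop state (merged, buffer), rephrased as recursion over the remaining lines for the induction
def auxA (b : List String) : List String → List String
  | [] => if b = [] then [] else [PySem.Str.join ": " b]
  | l :: ls =>
    if isTitle l then auxA (b ++ [l]) ls
    else (if b = [] then [] else [PySem.Str.join ": " b]) ++ l :: auxA [] ls

theorem foldl_eq_auxA (ls : List String) (m b : List String) :
    (let st := ls.foldl
      (fun (s : List String × List String) line =>
        if isTitle line then (s.1, s.2 ++ [line])
        else
          let merged := if s.2 ≠ [] then s.1 ++ [PySem.Str.join ": " s.2] else s.1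
          (merged ++ [line], []))
      (m, b)
     if st.2 ≠ [] then st.1 ++ [PySem.Str.join ": " st.2] else st.1) = m ++ auxA b ls := by
  induction ls generalizing m b with
  | nil =>
    simp only [List.foldl_nil, auxA]
    by_cases hb : b = [] <;> simp [hb]
  | cons l ls ih =>
    simp only [List.foldl_cons, auxA]
    by_cases ht : isTitle l <;> simp only [ht, if_true, if_false, Bool.false_eq_true]
    · exact ih m (b ++ [l])
    · by_cases hb : b = [] <;> simp only [hb, ne_eq, not_true_eq_false, not_false_eq_true, ite_true, ite_false] <;>
        rw [ih] <;> simp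

-- extra fuel is irrelevant once it covers the list length
theorem altGo_fuel (n : Nat) : ∀ (m : Nat) (ls : List String), ls.length ≤ n → ls.length ≤ m → altGo n ls = altGo m ls := by
  induction n with
  | zero =>
    intro m ls hls _
    have : ls = [] := List.eq_nil_of_length_eq_zero (Nat.le_zero.mp hls)
    subst this
    cases m <;> rfl
  | succ n ih =>
    intro m ls hls hm
    match ls with
    | [] => cases m <;> rfl
    | l :: ls' =>
      have h' : ls'.length ≤ n := by simpa using Nat.lt_succ_iff.mp (Nat.lt_of_lt_of_le (by simp) hls)
      match m with
      | m' + 1 =>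
        have hm' : ls'.length ≤ m' := by simpa using Nat.lt_succ_iff.mp (Nat.lt_of_lt_of_le (by simp) hm)
        by_cases ht : isTitle l
        · have hd : (ls'.dropWhile isTitle).length ≤ ls'.length := List.length_dropWhile_le _ _
          simp only [altGo, ht, if_true]
          rw [ih m' _ (le_trans hd h') (le_trans hd hm')]
        · simp only [altGo, ht, Bool.false_eq_true, if_false]
          rw [ih m' _ h' hm']

-- auxA with a nonempty pending buffer of titles finishes the current run, and auxA [] is B's scan
theorem auxA_eq_altGo_strong (n : Nat) :
    ∀ ls : List String, ls.length ≤ n →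
      (auxA [] ls = altGo n ls) ∧
      (∀ b : List String, b ≠ [] →
        auxA b ls = PySem.Str.join ": " (b ++ ls.takeWhile isTitle) ::
          altGo n (ls.dropWhile isTitle)) := by
  induction n with
  | zero =>
    intro ls hls
    have : ls = [] := List.eq_nil_of_length_eq_zero (Nat.le_zero.mp hls)
    subst this
    constructor
    · simp [auxA, altGo]
    · intro b hb; simp [auxA, altGo, hb]
  | succ n ih =>
    intro ls hls
    match ls with
    | [] =>
      constructor
      · simp [auxA, altGo]
      · intro b hb; simp [auxA, altGo, hb]
    | l :: ls' =>
      have hlen : ls'.length ≤ n := by simpa using Nat.lt_succ_iff.mp (Nat.lt_of_lt_of_le (by simp) hls)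
      have hd : (ls'.dropWhile isTitle).length ≤ ls'.length := List.length_dropWhile_le _ _
      have hmono : altGo (n + 1) (ls'.dropWhile isTitle) = altGo n (ls'.dropWhile isTitle) :=
        altGo_fuel (n + 1) n _ (le_trans hd (le_trans hlen (Nat.le_succ n))) (le_trans hd hlen)
      constructor
      · by_cases ht : isTitle l
        · have h2 := (ih ls' hlen).2 [l] (by simp)
          simp only [auxA, altGo, ht, if_true]
          simpa using h2
        · simp only [auxA, altGo, ht, Bool.false_eq_true, if_false, List.nil_append]
          rw [(ih ls' hlen).1]
          simp
      · intro b hb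
        by_cases ht : isTitle l
        · have h2 := (ih ls' hlen).2 (b ++ [l]) (by simp)
          simp only [auxA, ht, if_true, List.takeWhile_cons, List.dropWhile_cons, hmono]
          rw [h2]; simp
        · simp only [auxA, altGo, ht, Bool.false_eq_true, if_false, List.takeWhile_cons, List.dropWhile_cons, hb]
          rw [(ih ls' hlen).1]
          simp

-- ===== VERDICT (by name: the statement is the Claim_ definition above) =====
theorem merge_uppercase_titles_spec : Claim_equal_merge_uppercase_titles := by
  intro lines _
  unfold Spec_merge_uppercase_titles merge_uppercase_titles merge_uppercase_titles_alt
  rw [foldl_eq_auxA]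
  rw [(auxA_eq_altGo_strong lines.length lines le_rfl).1]
  simp
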